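-- pv_equiv track=rewrite | github.com/VishwamAI/Generative-Flex | fix_syntax_patterns_final_v81.py | fix_imports
-- ===== SOURCE A (Python) =====
-- def fix_imports(content: str) -> str:
--     """Fix import statement formatting."""
--     lines = content.split('\n')
--     fixed_lines = []
--     import_lines = []
--
--     for line in lines:
--         if line.strip().startswith(('import ', 'from ')):
--             # Clean up import statement
--             if 'from' in line and 'import' in line:
--                 parts = line.split('import')
--                 if len(parts) == 2:
--                     from_part = parts[0].strip()
--                     import_part = parts[1].strip()
--                     import_lines.append(f"{from_part} import {import_part}")
--             else:
--                 import_lines.append(line.strip())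
--         else:
--             if import_lines:
--                 # Sort and add imports
--                 import_lines.sort()
--                 fixed_lines.extend(import_lines)
--                 import_lines = []
--                 if line.strip():
--                     fixed_lines.append('')
--             fixed_lines.append(line)
--
--     if import_lines:
--         import_lines.sort()
--         fixed_lines.extend(import_lines)
--
--     return '\n'.join(fixed_lines)
-- ===== SOURCE B (Python) =====
-- def _clean(line):
--     if 'from' in line and 'import' in line:
--         parts = line.split('import')
--         if len(parts) != 2:
--             return None
--         return f"{parts[0].strip()} import {parts[1].strip()}"
--     return line.strip()
--
--
-- def fix_imports(content: str) -> str: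
--     # Pass 1: index the cleaned import lines by how many non-import lines precede them.
--     others = []
--     blocks = {}
--     for line in content.split('\n'):
--         if line.strip().startswith(('import ', 'from ')):
--             c = _clean(line)
--             if c is not None:
--                 blocks.setdefault(len(others), []).append(c)
--         else:
--             others.append(line)
--     # Pass 2: reassemble — sorted block j goes right before the j-th non-import line.
--     out = []
--     for j, line in enumerate(others):
--         blk = sorted(blocks.get(j, []))
--         out.extend(blk)
--         if blk and line.strip():
--             out.append('')
--         out.append(line)
--     out.extend(sorted(blocks.get(len(others), [])))
--     return '\n'.join(out)
-- ===== Notes on version B (the rewrite author's own statement) =====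
-- stated objective: alternative
-- what changed: Replaces A's single streaming pass with a flushed import-accumulator by two staged passes over different structures: pass 1 splits the lines into the list of non-import lines and a dict mapping each import block to the count of non-import lines preceding it; pass 2 reassembles by enumerating the non-import lines and splicing in each sorted block by index lookup (blank line decided from the looked-up block's emptiness, no pending flag).
import Mathlib
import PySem

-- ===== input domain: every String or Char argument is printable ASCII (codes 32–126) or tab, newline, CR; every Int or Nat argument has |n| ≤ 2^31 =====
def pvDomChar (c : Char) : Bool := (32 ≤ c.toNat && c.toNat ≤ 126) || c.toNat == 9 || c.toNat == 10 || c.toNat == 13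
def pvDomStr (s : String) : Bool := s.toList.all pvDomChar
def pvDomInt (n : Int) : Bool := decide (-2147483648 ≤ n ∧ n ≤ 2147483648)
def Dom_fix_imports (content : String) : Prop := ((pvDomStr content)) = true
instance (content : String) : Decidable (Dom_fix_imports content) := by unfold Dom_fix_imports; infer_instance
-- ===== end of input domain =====

-- B replaces A's single streaming pass (import accumulator flushed at each non-import line)
-- with two staged passes: a dict indexing each import block by the count of preceding
-- non-import lines, then an indexed reassembly (objective: alternative decomposition).

-- ===== PORT A =====
-- line.strip().startswith(('import ', 'from '))
def pvIsImport (line : String) : Bool :=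
  PySem.Str.startswith (PySem.Str.strip line) "import " ||
  PySem.Str.startswith (PySem.Str.strip line) "from "

-- the body of A's 'for line in lines' loop, on the state (fixed_lines, import_lines)
def pvStepA (st : List String × List String) (line : String) : List String × List String :=
  if pvIsImport line then
    if PySem.Str.isIn "from" line && PySem.Str.isIn "import" line then
      match (PySem.Str.split? line "import").getD [] with
      | [a, b] => (st.1, st.2 ++ [PySem.Str.strip a ++ " import " ++ PySem.Str.strip b])
      | _ => (st.1, st.2)
    else (st.1, st.2 ++ [PySem.Str.strip line])
  else
    if st.2.isEmpty then (st.1 ++ [line], st.2)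
    else (st.1 ++ PySem.List.sorted st.2 (fun x => x) false ++
            (if PySem.Str.strip line != "" then [""] else []) ++ [line], [])

def fix_imports (content : String) : String :=
  PySem.Str.join "\n"
    ((fun p : List String × List String =>
        if p.2.isEmpty then p.1 else p.1 ++ PySem.List.sorted p.2 (fun x => x) false)
      (((PySem.Str.split? content "\n").getD []).foldl pvStepA ([], [])))

-- ===== PORT B =====
-- _clean: reformat/drop of one import line (none = silently dropped)
def pvClean (line : String) : Option String :=
  if PySem.Str.isIn "from" line && PySem.Str.isIn "import" line then
    match (PySem.Str.split? line "import").getD [] with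
    | [a, b] => some (PySem.Str.strip a ++ " import " ++ PySem.Str.strip b)
    | _ => none
  else some (PySem.Str.strip line)

-- pass 1 step: collect non-import lines; index cleaned imports by len(others)
def pvStepB1 (st : List String × PySem.Dict Int (List String)) (line : String) :
    List String × PySem.Dict Int (List String) :=
  if pvIsImport line then
    match pvClean line with
    | some c => (st.1, st.2.modify ((st.1.length : Int)) [] (· ++ [c]))
    | none => st
  else (st.1 ++ [line], st.2)

-- pass 2 step: splice sorted block j before the j-th non-import line
def pvStepB2 (d : PySem.Dict Int (List String)) (out : List String) (jl : Int × String) :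
    List String :=
  let blk := PySem.List.sorted (d.getD jl.1 []) (fun x => x) false
  out ++ blk ++ (if !blk.isEmpty && PySem.Str.strip jl.2 != "" then [""] else []) ++ [jl.2]

def fix_imports_alt (content : String) : String :=
  let st := ((PySem.Str.split? content "\n").getD []).foldl pvStepB1 ([], PySem.Dict.empty)
  PySem.Str.join "\n"
    ((PySem.List.enumerate st.1 0).foldl (pvStepB2 st.2) [] ++
      PySem.List.sorted (st.2.getD ((st.1.length : Int)) []) (fun x => x) false)

-- ===== PRECONDITION & SPEC =====
def Spec_fix_imports (content : String) (out : String) : Prop := out = fix_imports_alt content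
instance (content : String) (out : String) : Decidable (Spec_fix_imports content out) := by unfold Spec_fix_imports; infer_instance

-- ===== CLAIM (what is proved, stated in full; the proofs are below) =====
def Claim_equal_fix_imports : Prop := ∀ (content : String), Dom_fix_imports content → Spec_fix_imports content (fix_imports content)

-- ===== LEMMAS AND PROOFS =====

-- recursive restatement of A's fold, including the final flush (proof helper)
def pvAloop : List String → List String → List String → List String
  | [], fixed, imps => if imps.isEmpty then fixed else fixed ++ PySem.List.sorted imps (fun x => x) false
  | l :: ls, fixed, imps =>
    if pvIsImport l then pvAloop ls fixed (imps ++ (pvClean l).toList)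
    else if imps.isEmpty then pvAloop ls (fixed ++ [l]) imps
    else pvAloop ls (fixed ++ PySem.List.sorted imps (fun x => x) false ++
            (if PySem.Str.strip l != "" then [""] else []) ++ [l]) []

theorem pvStepA_import (st : List String × List String) (line : String)
    (h : pvIsImport line = true) : pvStepA st line = (st.1, st.2 ++ (pvClean line).toList) := by
  unfold pvStepA pvClean
  rw [h, if_pos rfl]
  split
  · cases hm : (PySem.Str.split? line "import").getD [] with
    | nil => simp
    | cons a t =>
      cases t with
      | nil => simp
      | cons b u => cases u <;> simp
  · simp

theorem pvFoldl_eq_aloop (ls : List String) : ∀ fixed imps,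
    (fun p : List String × List String =>
        if p.2.isEmpty then p.1 else p.1 ++ PySem.List.sorted p.2 (fun x => x) false)
      (ls.foldl pvStepA (fixed, imps)) = pvAloop ls fixed imps := by
  induction ls with
  | nil => intro fixed imps; rfl
  | cons l ls ih =>
    intro fixed imps
    rw [List.foldl_cons]
    conv_rhs => rw [pvAloop]
    by_cases h : pvIsImport l = true
    · rw [pvStepA_import (fixed, imps) l h, if_pos h]; exact ih _ _
    · rw [if_neg h]
      show _ = if imps.isEmpty = true then _ else _
      by_cases he : imps.isEmpty = true
      · rw [if_pos he]
        have : pvStepA (fixed, imps) l = (fixed ++ [l], imps) := by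
          unfold pvStepA; rw [if_neg h, if_pos he]
        rw [this]; exact ih _ _
      · rw [if_neg he]
        have : pvStepA (fixed, imps) l =
            (fixed ++ PySem.List.sorted imps (fun x => x) false ++
              (if PySem.Str.strip l != "" then [""] else []) ++ [l], []) := by
          unfold pvStepA; rw [if_neg h, if_neg he]
        rw [this]; exact ih _ _

-- the dict built by pass 1, as a recursion (proof helper)
def pvD : PySem.Dict Int (List String) → Nat → List String → PySem.Dict Int (List String)
  | d, _, [] => d
  | d, j, l :: ls =>
    if pvIsImport l then
      match pvClean l with
      | some c => pvD (d.modify (j : Int) [] (· ++ [c])) j ls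
      | none => pvD d j ls
    else pvD d (j + 1) ls

theorem pvFoldl_B1 (ls : List String) : ∀ (o : List String) d,
    ls.foldl pvStepB1 (o, d) =
      (o ++ ls.filter (fun l => !pvIsImport l), pvD d o.length ls) := by
  induction ls with
  | nil => intro o d; simp [pvD]
  | cons l ls ih =>
    intro o d
    rw [List.foldl_cons, List.filter_cons]
    by_cases h : pvIsImport l = true
    · have hs : pvStepB1 (o, d) l =
          (o, (match pvClean l with
               | some c => d.modify ((o.length : Int)) [] (· ++ [c])
               | none => d)) := by
        unfold pvStepB1; rw [if_pos h]; cases pvClean l <;> rfl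
      rw [hs]
      simp only [pvD, h, if_pos, Bool.not_true]
      cases pvClean l <;> simp [ih]
    · have hf : pvIsImport l = false := by simpa using h
      have hs : pvStepB1 (o, d) l = (o ++ [l], d) := by
        unfold pvStepB1; rw [hf]; rfl
      rw [hs, ih]
      simp [pvD, hf]

-- bucket k of a line list: the cleaned imports of the block after k non-import lines
def pvBucket : List String → Nat → List String
  | [], _ => []
  | l :: ls, 0 => if pvIsImport l then (pvClean l).toList ++ pvBucket ls 0 else []
  | l :: ls, k + 1 => if pvIsImport l then pvBucket ls (k + 1) else pvBucket ls k

theorem pvD_getD_lt (ls : List String) : ∀ d (j k : Nat), k < j →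
    (pvD d j ls).getD ((k : Nat) : Int) [] = d.getD ((k : Nat) : Int) [] := by
  induction ls with
  | nil => intro d j k _; rfl
  | cons l ls ih =>
    intro d j k hk
    by_cases h : pvIsImport l = true
    · simp only [pvD, h, if_pos]
      cases hc : pvClean l with
      | none => exact ih d j k hk
      | some c =>
        rw [ih _ j k hk, PySem.Dict.getD_modify_of_ne]
        intro he
        have : (k : Int) ≠ (j : Int) := by exact_mod_cast Nat.ne_of_lt hk
        exact this he
    · have hf : pvIsImport l = false := by simpa using h
      simp only [pvD, hf, Bool.false_eq_true, if_false]
      exact ih d (j + 1) k (Nat.lt_succ_of_lt hk)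

theorem pvD_getD (ls : List String) : ∀ d (j k : Nat),
    (pvD d j ls).getD (((j + k : Nat)) : Int) [] =
      d.getD (((j + k : Nat)) : Int) [] ++ pvBucket ls k := by
  induction ls with
  | nil => intro d j k; simp [pvD, pvBucket]
  | cons l ls ih =>
    intro d j k
    by_cases h : pvIsImport l = true
    · simp only [pvD, h, if_pos]
      cases hc : pvClean l with
      | none =>
        rw [ih d j k]
        cases k <;> simp [pvBucket, h, hc]
      | some c =>
        rw [ih _ j k]
        cases k with
        | zero =>
          rw [Nat.add_zero, PySem.Dict.getD_modify_self]
          simp [pvBucket, h, hc]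
        | succ k' =>
          rw [PySem.Dict.getD_modify_of_ne]
          · simp [pvBucket, h]
          · intro he
            have : ((j + (k' + 1) : Nat) : Int) ≠ (j : Int) := by
              have : (j + (k' + 1) : Nat) ≠ j := by omega
              exact_mod_cast this
            exact this he
    · have hf : pvIsImport l = false := by simpa using h
      simp only [pvD, hf, Bool.false_eq_true, if_false]
      cases k with
      | zero =>
        have hj : ((j + 0 : Nat) : Int) = ((j : Nat) : Int) := by norm_num
        rw [hj, pvD_getD_lt ls d (j + 1) j (Nat.lt_succ_self j)]
        simp [pvBucket, hf]
      | succ k' =>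
        have : (j + (k' + 1) : Nat) = ((j + 1) + k' : Nat) := by omega
        rw [this, ih d (j + 1) k']
        simp [pvBucket, hf]

-- the reassembly of pass 2, as a recursion over the non-import lines (proof helper)
def pvAssemble (buck : Nat → List String) (out : List String) : List String → List String
  | [] => out ++ PySem.List.sorted (buck 0) (fun x => x) false
  | l :: os =>
    pvAssemble (fun k => buck (k + 1))
      (out ++ PySem.List.sorted (buck 0) (fun x => x) false ++
        (if !(PySem.List.sorted (buck 0) (fun x => x) false).isEmpty &&
            PySem.Str.strip l != "" then [""] else []) ++ [l]) os

theorem pvAssemble_cons (buck : Nat → List String) (out : List String) (l : String)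
    (os : List String) :
    pvAssemble buck out (l :: os) =
      pvAssemble (fun k => buck (k + 1))
        (out ++ PySem.List.sorted (buck 0) (fun x => x) false ++
          (if !(PySem.List.sorted (buck 0) (fun x => x) false).isEmpty &&
              PySem.Str.strip l != "" then [""] else []) ++ [l]) os := rfl

theorem pvFoldl_B2 (os : List String) : ∀ (d : PySem.Dict Int (List String)) out (j : Int),
    (PySem.List.enumerate os j).foldl (pvStepB2 d) out ++
        PySem.List.sorted (d.getD (j + (os.length : Int)) []) (fun x => x) false =
      pvAssemble (fun k => d.getD (j + (k : Int)) []) out os := by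
  induction os with
  | nil =>
    intro d out j
    simp [PySem.List.enumerate_nil, pvAssemble]
  | cons l os ih =>
    intro d out j
    rw [PySem.List.enumerate_cons, List.foldl_cons]
    show (PySem.List.enumerate os (j + 1)).foldl (pvStepB2 d) (pvStepB2 d out (j, l)) ++ _ = _
    have hlen : j + ((l :: os).length : Int) = (j + 1) + (os.length : Int) := by
      simp; ring
    rw [hlen, ih d _ (j + 1)]
    simp only [pvAssemble, pvStepB2]
    have hsh : (fun k : Nat => d.getD (j + ((k + 1 : Nat) : Int)) []) =
        (fun k : Nat => d.getD ((j + 1) + (k : Int)) []) := by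
      funext k; congr 1; push_cast; ring
    simp only [Nat.cast_zero, add_zero, hsh]

-- A's streaming loop equals the indexed reassembly (the heart of the equivalence)
theorem pvAloop_eq_assemble (ls : List String) : ∀ fixed pre,
    pvAloop ls fixed pre =
      pvAssemble (fun k => if k = 0 then pre ++ pvBucket ls 0 else pvBucket ls k) fixed
        (ls.filter (fun l => !pvIsImport l)) := by
  induction ls with
  | nil =>
    intro fixed pre
    simp only [List.filter_nil, pvAssemble, pvAloop, pvBucket, List.append_nil, if_pos]
    by_cases hp : pre.isEmpty = true
    · rw [if_pos hp]
      rw [List.isEmpty_iff.mp hp]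
      have : PySem.List.sorted ([] : List String) (fun x => x) false = [] :=
        (PySem.List.sorted_eq_nil_iff _ _ _).mpr rfl
      simp [this]
    · rw [if_neg hp]
  | cons l ls ih =>
    intro fixed pre
    rw [List.filter_cons]
    by_cases h : pvIsImport l = true
    · simp only [pvAloop, h, if_pos, Bool.not_true, Bool.false_eq_true, if_false]
      rw [ih fixed (pre ++ (pvClean l).toList)]
      congr 1
      funext k
      cases k with
      | zero => simp [pvBucket, h]
      | succ k' => simp [pvBucket, h]
    · have hf : pvIsImport l = false := by simpa using h
      have hb0 : pvBucket (l :: ls) 0 = [] := by simp [pvBucket, hf]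
      have hshift : (fun k : Nat =>
            if k + 1 = 0 then pre ++ pvBucket (l :: ls) 0 else pvBucket (l :: ls) (k + 1)) =
          (fun k : Nat => if k = 0 then ([] : List String) ++ pvBucket ls 0 else pvBucket ls k) := by
        funext k
        cases k with
        | zero => simp [pvBucket, hf]
        | succ k' => simp [pvBucket, hf]
      have hbuck0 : (if (0 : Nat) = 0 then pre ++ pvBucket (l :: ls) 0 else pvBucket (l :: ls) 0) =
          pre := by simp [hb0]
      by_cases hp : pre.isEmpty = true
      · obtain rfl : pre = [] := List.isEmpty_iff.mp hp
        simp only [pvAloop, hf, Bool.false_eq_true, if_false, List.isEmpty_nil, if_true]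
        simp only [Bool.not_false, if_true]
        rw [pvAssemble_cons, hshift]
        have hsnil : PySem.List.sorted
            (if (0 : Nat) = 0 then [] ++ pvBucket (l :: ls) 0 else pvBucket (l :: ls) 0)
            (fun x => x) false = [] := by
          rw [hbuck0]; exact (PySem.List.sorted_eq_nil_iff _ _ _).mpr rfl
        rw [hsnil]
        simp only [Bool.not_true, List.isEmpty_nil, Bool.false_and, Bool.false_eq_true, if_false,
          List.append_nil]
        exact ih (fixed ++ [l]) []
      · have hpe : pre.isEmpty = false := by simpa using hp
        simp only [pvAloop, hf, Bool.false_eq_true, if_false, hpe]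
        simp only [Bool.not_false, if_true]
        rw [pvAssemble_cons, hshift, hbuck0]
        have hne : (PySem.List.sorted pre (fun x => x) false).isEmpty = false := by
          have : pre ≠ [] := by simpa using hp
          simp [PySem.List.sorted_eq_nil_iff, this]
        rw [hne]
        simp only [Bool.not_false, Bool.true_and]
        exact ih _ []

-- ===== VERDICT (by name: the statement is the Claim_ definition above) =====
theorem fix_imports_spec : Claim_equal_fix_imports := by
  intro content _
  unfold Spec_fix_imports fix_imports fix_imports_alt
  rw [pvFoldl_eq_aloop]
  set ls := (PySem.Str.split? content "\n").getD [] with hls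
  rw [pvFoldl_B1 ls [] PySem.Dict.empty]
  simp only [List.nil_append, List.length_nil]
  set os := ls.filter (fun l => !pvIsImport l) with hos
  have hbuck : ∀ k : Nat, (pvD PySem.Dict.empty 0 ls).getD ((k : Nat) : Int) [] = pvBucket ls k := by
    intro k
    have := pvD_getD ls PySem.Dict.empty 0 k
    rw [Nat.zero_add] at this
    rw [this]
    simp [PySem.Dict.getD_empty]
  have hE := pvFoldl_B2 os (pvD PySem.Dict.empty 0 ls) [] 0
  have h1 : (0 : Int) + ((os.length : Nat) : Int) = ((os.length : Nat) : Int) := by ring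
  rw [h1] at hE
  have h2 : (fun k : Nat => (pvD PySem.Dict.empty 0 ls).getD ((0 : Int) + (k : Int)) []) =
      (fun k : Nat => pvBucket ls k) := by
    funext k
    rw [show (0 : Int) + (k : Int) = ((k : Nat) : Int) by ring, hbuck k]
  rw [h2] at hE
  rw [hE]
  congr 1
  rw [pvAloop_eq_assemble ls [] []]
  congr 1
  funext k
  cases k <;> simp
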